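-- pv_equiv track=rewrite | github.com/nicholasrs05/if5153-Tubes-NoLeP | cause_textgen/extract_pdf_to_csv.py | build_heading_index
-- ===== SOURCE A (Python) =====
-- from typing import Dict, List, Tuple
--
-- def build_heading_index(
--     full_text: str,
--     heading_variants: Dict[str, List[str]],
-- ) -> List[Tuple[int, str]]:
--
--     text_upper = full_text.upper()
--     hits = []
--
--     # heading_variants: key = heading_label, value = list of keyword patterns
--     for heading_key, variants in heading_variants.items():
--         for pattern in variants:
--             pattern_upper = pattern.upper()
--             idx = text_upper.find(pattern_upper)
--             if idx != -1:
--                 hits.append((idx, heading_key))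
--                 break  # cukup ambil match pertama untuk heading ini
--
--     # sort berdasarkan posisi kemunculan
--     hits.sort(key=lambda x: x[0])
--     return hits
-- ===== SOURCE B (Python) =====
-- def build_heading_index(full_text, heading_variants):
--     text = full_text.upper()
--     # distinct upper-cased patterns, in first-appearance order
--     patterns = dict.fromkeys(p.upper() for vs in heading_variants.values() for p in vs)
--     first = {}
--     buckets = {}  # first character -> patterns starting with it, not yet found
--     for p in patterns:
--         if p:
--             buckets.setdefault(p[0], []).append(p)
--         else:
--             first[p] = 0  # the empty pattern occurs at position 0
--     # one left-to-right sweep; at each position only patterns whose first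
--     # character matches are tried, and a pattern is retired at its first hit
--     for j, c in enumerate(text):
--         group = buckets.get(c)
--         if not group:
--             continue
--         still = []
--         for p in group:
--             if text.startswith(p, j):
--                 first[p] = j
--             else:
--                 still.append(p)
--         buckets[c] = still
--     hits = []
--     for key, variants in heading_variants.items():
--         for p in variants:
--             idx = first.get(p.upper())
--             if idx is not None:
--                 hits.append((idx, key))
--                 break
--     hits.sort(key=lambda x: x[0])
--     return hits
-- ===== Notes on version B (the rewrite author's own statement) =====
-- stated objective: alternative
-- what changed: A runs a separate full-text find() for every variant of every heading; B dedups the upper-cased patterns once into per-first-character buckets and finds every pattern's first occurrence in a single left-to-right sweep over text positions (only the bucket of the current character is tried, and a pattern is retired at its first hit), then reconstructs the per-heading first-variant hits from that table and stable-sorts.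
import Mathlib
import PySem

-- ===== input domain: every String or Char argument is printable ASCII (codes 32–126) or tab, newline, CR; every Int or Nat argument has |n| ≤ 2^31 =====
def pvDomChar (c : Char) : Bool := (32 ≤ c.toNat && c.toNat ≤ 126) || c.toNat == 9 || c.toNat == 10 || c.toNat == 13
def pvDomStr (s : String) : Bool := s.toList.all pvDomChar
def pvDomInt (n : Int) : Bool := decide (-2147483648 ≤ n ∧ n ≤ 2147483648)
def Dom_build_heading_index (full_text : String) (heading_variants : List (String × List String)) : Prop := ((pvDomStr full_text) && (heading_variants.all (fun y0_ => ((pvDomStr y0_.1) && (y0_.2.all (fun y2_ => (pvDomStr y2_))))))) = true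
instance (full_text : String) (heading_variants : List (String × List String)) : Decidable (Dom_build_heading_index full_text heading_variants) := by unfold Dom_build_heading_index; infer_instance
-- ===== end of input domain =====

-- B replaces A's per-pattern full-text `find` scans by one left-to-right sweep over text
-- positions, trying only the per-first-character bucket of still-unfound distinct patterns
-- at each position and retiring each pattern at its first occurrence (objective: alternative).

-- ===== PORT A =====
-- inner `for pattern in variants: … break` loop of A
def aFindVariant (text_upper : String) (heading_key : String) :
    List String → List (Int × String) → List (Int × String)
  | [], hits => hits
  | pattern :: rest, hits =>
    let pattern_upper := PySem.Str.upper pattern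
    let idx := PySem.Str.find text_upper pattern_upper
    if idx ≠ -1 then hits ++ [(idx, heading_key)]
    else aFindVariant text_upper heading_key rest hits

def build_heading_index (full_text : String) (heading_variants : List (String × List String)) : List (Int × String) :=
  let text_upper := PySem.Str.upper full_text
  let hits := heading_variants.foldl (fun hits kv => aFindVariant text_upper kv.1 kv.2 hits) []
  PySem.List.sorted hits (fun x => x.1) false

-- ===== PORT B =====
-- B's bucket-building loop: `buckets.setdefault(p[0], []).append(p)` is
-- `modify p[0] [] (· ++ [p])`; the empty pattern goes straight to `first[p] = 0`
def bBuild :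
    List (List Char) → PySem.Dict Char (List (List Char)) × PySem.Dict (List Char) Int →
      PySem.Dict Char (List (List Char)) × PySem.Dict (List Char) Int
  | [], bf => bf
  | p :: rest, bf =>
    bBuild rest (match p with
      | [] => (bf.1, bf.2.insert [] (0 : Int))
      | c :: _ => (bf.1.modify c [] (fun g => g ++ [p]), bf.2))

-- body of B's inner `for p in group:` loop; `text.startswith(p, j)` for 0 ≤ j ≤ len(text)
-- is exactly `p` being a prefix of the suffix starting at j
def bStepF (text : List Char) (j : Nat)
    (acc : PySem.Dict (List Char) Int × List (List Char)) (p : List Char) :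
    PySem.Dict (List Char) Int × List (List Char) :=
  if PySem.Chars.startswith (text.drop j) p then (acc.1.insert p (j : Int), acc.2)
  else (acc.1, acc.2 ++ [p])

-- B's `for j, c in enumerate(text):` sweep; `rest` is the not-yet-visited suffix text[j:]
def bScan (text : List Char) :
    List Char → Nat → PySem.Dict Char (List (List Char)) → PySem.Dict (List Char) Int →
      PySem.Dict (List Char) Int
  | [], _, _, first => first
  | c :: rest, j, buckets, first =>
    match buckets.get? c with
    | none => bScan text rest (j + 1) buckets first          -- `if not group: continue`
    | some group =>
      if group.isEmpty then bScan text rest (j + 1) buckets first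
      else
        let st := group.foldl (bStepF text j) (first, [])
        bScan text rest (j + 1) (buckets.insert c st.2) st.1

-- B's reconstruction loop (`first.get(p.upper())` with break)
def bReconstruct (first : PySem.Dict (List Char) Int) (key : String) :
    List String → List (Int × String) → List (Int × String)
  | [], hits => hits
  | p :: rest, hits =>
    match first.get? (PySem.Str.upper p).toList with
    | some idx => hits ++ [(idx, key)]
    | none => bReconstruct first key rest hits

def build_heading_index_alt (full_text : String) (heading_variants : List (String × List String)) : List (Int × String) :=
  let text := (PySem.Str.upper full_text).toList
  -- dict.fromkeys(…) over the generator = ordered dedup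
  let patterns := PySem.List.dedup ((heading_variants.flatMap (fun kv => kv.2)).map (fun p => (PySem.Str.upper p).toList))
  let bf := bBuild patterns (PySem.Dict.empty, PySem.Dict.empty)
  let first := bScan text text 0 bf.1 bf.2
  let hits := heading_variants.foldl (fun hits kv => bReconstruct first kv.1 kv.2 hits) []
  PySem.List.sorted hits (fun x => x.1) false

-- ===== PRECONDITION & SPEC =====
def Spec_build_heading_index (full_text : String) (heading_variants : List (String × List String)) (out : List (Int × String)) : Prop := out = build_heading_index_alt full_text heading_variants
instance (full_text : String) (heading_variants : List (String × List String)) (out : List (Int × String)) : Decidable (Spec_build_heading_index full_text heading_variants out) := by unfold Spec_build_heading_index; infer_instance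

-- ===== CLAIM (what is proved, stated in full; the proofs are below) =====
def Claim_equal_build_heading_index : Prop := ∀ (full_text : String) (heading_variants : List (String × List String)), Dom_build_heading_index full_text heading_variants → Spec_build_heading_index full_text heading_variants (build_heading_index full_text heading_variants)

-- ===== LEMMAS AND PROOFS =====

-- the `still` list built by one bucket pass collects exactly the non-matching patterns
theorem bStep_snd (text : List Char) (j : Nat) :
    ∀ (R : List (List Char)) (first : PySem.Dict (List Char) Int) (acc : List (List Char)),
      (R.foldl (bStepF text j) (first, acc)).2
        = acc ++ R.filter (fun p => !PySem.Chars.startswith (text.drop j) p)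
  | [], first, acc => by simp
  | q :: R, first, acc => by
    by_cases h : PySem.Chars.startswith (text.drop j) q
    · simp [List.foldl, bStepF, h, bStep_snd text j R]
    · simp [List.foldl, bStepF, h, bStep_snd text j R]

-- the `first` dict after one bucket pass: matching patterns of R map to j, others unchanged
theorem bStep_fst_get? (text : List Char) (j : Nat) :
    ∀ (R : List (List Char)) (first : PySem.Dict (List Char) Int) (acc : List (List Char)) (p : List Char),
      (R.foldl (bStepF text j) (first, acc)).1.get? p
        = if p ∈ R ∧ PySem.Chars.startswith (text.drop j) p then some (j : Int) else first.get? p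
  | [], first, acc, p => by simp
  | q :: R, first, acc, p => by
    by_cases h : PySem.Chars.startswith (text.drop j) q
    · rw [List.foldl_cons]
      simp only [bStepF, h, if_true]
      rw [bStep_fst_get? text j R, PySem.Dict.get?_insert]
      by_cases hsw : PySem.Chars.startswith (text.drop j) p
      · by_cases hpq : p = q
        · subst hpq; simp [hsw]
        · simp [hsw, hpq, List.mem_cons]
      · have hpq : p ≠ q := fun he => hsw (he ▸ h)
        simp [hsw, hpq]
    · rw [List.foldl_cons]
      simp only [bStepF, h]
      rw [bStep_fst_get? text j R]
      by_cases hpq : p = q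
      · subst hpq; simp [h]
      · simp [List.mem_cons, hpq]

-- bucket contents after the build loop: the patterns with that first character, in order
theorem bBuild_buckets :
    ∀ (P : List (List Char)) (bf : PySem.Dict Char (List (List Char)) × PySem.Dict (List Char) Int) (c : Char),
      (bBuild P bf).1.getD c [] = bf.1.getD c [] ++ P.filter (fun q => q.head? == some c)
  | [], bf, c => by simp [bBuild]
  | p :: rest, bf, c => by
    cases p with
    | nil =>
      rw [bBuild, bBuild_buckets rest]
      simp
    | cons d tl =>
      rw [bBuild, bBuild_buckets rest]
      by_cases hdc : d = c
      · subst hdc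
        simp
      · simp [PySem.Dict.getD_modify, hdc, Ne.symm hdc]


-- the `first` dict after the build loop: only the empty pattern, mapped to 0
theorem bBuild_first :
    ∀ (P : List (List Char)) (bf : PySem.Dict Char (List (List Char)) × PySem.Dict (List Char) Int) (p : List Char),
      (bBuild P bf).2.get? p = if p = [] ∧ [] ∈ P then some 0 else bf.2.get? p
  | [], bf, p => by simp [bBuild]
  | q :: rest, bf, p => by
    cases q with
    | nil =>
      rw [bBuild, bBuild_first rest]
      by_cases hp : p = []
      · subst hp; simp [PySem.Dict.get?_insert_self]
      · simp [hp, PySem.Dict.get?_insert_of_ne _ _ hp]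
    | cons d tl =>
      rw [bBuild, bBuild_first rest]
      simp

-- characterization of the sweep: a bucketed pattern ends at its Python find index,
-- anything not sitting in its own bucket is untouched
theorem bScan_get (text : List Char) :
    ∀ (rest : List Char) (j : Nat) (buckets : PySem.Dict Char (List (List Char)))
      (first : PySem.Dict (List Char) Int) (p : List Char),
      rest = text.drop j →
      (∀ c, ∀ q ∈ buckets.getD c [], q.head? = some c) →
      (∀ c, ∀ q ∈ buckets.getD c [], first.get? q = none) →
      ((∀ c, p.head? = some c → p ∈ buckets.getD c [] → (∀ i, i < j → ¬ (p <+: text.drop i)) →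
          (bScan text rest j buckets first).get? p
            = if PySem.Chars.find text p = -1 then none else some (PySem.Chars.find text p))
       ∧ ((∀ c, p.head? = some c → p ∉ buckets.getD c []) →
          (bScan text rest j buckets first).get? p = first.get? p))
  | [], j, buckets, first, p => by
    intro hrest hbk hnone
    refine ⟨?_, fun _ => rfl⟩
    intro c hc hpmem hno
    rw [bScan, hnone c p hpmem, if_pos]
    by_contra hne
    have hlb := PySem.Chars.neg_one_le_find text p
    have hpos : 0 ≤ PySem.Chars.find text p := by omega
    have hspec := PySem.Chars.find_spec (s := text) (sub := p) hpos
    have hle := PySem.Chars.find_le_length (s := text) (sub := p)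
    have hlen : text.length ≤ j := List.drop_eq_nil_iff.1 hrest.symm
    have hk : (PySem.Chars.find text p).toNat < j := by
      by_contra hge
      have hdnil : text.drop (PySem.Chars.find text p).toNat = [] :=
        List.drop_eq_nil_iff.2 (by omega)
      rw [hdnil] at hspec
      rcases List.prefix_nil.1 hspec.1 with rfl
      simp at hc
    exact hno _ hk hspec.1
  | ch :: rest, j, buckets, first, p => by
    intro hrest hbk hnone
    have hrest' : rest = text.drop (j + 1) := by
      have h := congrArg (List.drop 1) hrest
      simpa [List.drop_drop] using h
    have hnopre : ∀ q : List Char, ∀ d, q.head? = some d → d ≠ ch → ¬ (q <+: text.drop j) := by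
      intro q d hd hne hpre
      rw [← hrest] at hpre
      cases q with
      | nil => simp at hd
      | cons e tl =>
        rcases List.cons_prefix_cons.1 hpre with ⟨rfl, -⟩
        simp at hd
        exact hne hd.symm
    rw [bScan]
    cases hg : buckets.get? ch with
    | none =>
      have hbempty : buckets.getD ch [] = [] := PySem.Dict.getD_of_get?_eq_none _ _ hg
      have IH := bScan_get text rest (j + 1) buckets first p hrest' hbk hnone
      constructor
      · intro c hc hpmem hno
        have hcch : c ≠ ch := by
          intro he; subst he; rw [hbempty] at hpmem; exact absurd hpmem List.not_mem_nil
        refine IH.1 c hc hpmem ?_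
        intro i hi
        rcases Nat.lt_succ_iff_lt_or_eq.1 hi with h | h
        · exact hno i h
        · subst h; exact hnopre p c hc hcch
      · exact fun h => IH.2 h
    | some group =>
      dsimp only
      have hgroup : buckets.getD ch [] = group := PySem.Dict.getD_of_get?_eq_some _ _ hg
      by_cases hemp : group.isEmpty
      · rw [if_pos hemp]
        rw [List.isEmpty_iff] at hemp
        subst hemp
        have IH := bScan_get text rest (j + 1) buckets first p hrest' hbk hnone
        constructor
        · intro c hc hpmem hno
          have hcch : c ≠ ch := by
            intro he; subst he; rw [hgroup] at hpmem; exact absurd hpmem List.not_mem_nil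
          refine IH.1 c hc hpmem ?_
          intro i hi
          rcases Nat.lt_succ_iff_lt_or_eq.1 hi with h | h
          · exact hno i h
          · subst h; exact hnopre p c hc hcch
        · exact fun h => IH.2 h
      · rw [if_neg hemp]
        have hsnd := bStep_snd text j group first []
        have hgHead : ∀ q ∈ group, q.head? = some ch := fun q hq => hbk ch q (hgroup ▸ hq)
        -- buckets after the step
        have hbk' : ∀ c, ∀ q ∈ ((buckets.insert ch (group.foldl (bStepF text j) (first, [])).2).getD c []),
            q.head? = some c := by
          intro c q hq
          rw [PySem.Dict.getD_insert] at hq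
          by_cases hc : c = ch
          · rw [if_pos hc, hsnd] at hq
            simp only [List.nil_append, List.mem_filter] at hq
            exact hc ▸ hgHead q hq.1
          · rw [if_neg hc] at hq
            exact hbk c q hq
        have hnone' : ∀ c, ∀ q ∈ ((buckets.insert ch (group.foldl (bStepF text j) (first, [])).2).getD c []),
            (group.foldl (bStepF text j) (first, [])).1.get? q = none := by
          intro c q hq
          rw [PySem.Dict.getD_insert] at hq
          by_cases hc : c = ch
          · rw [if_pos hc, hsnd] at hq
            simp only [List.nil_append, List.mem_filter, Bool.not_eq_eq_eq_not, Bool.not_true] at hq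
            rw [bStep_fst_get? text j group first [] q, if_neg (by simp [hq.2])]
            exact hnone ch q (hgroup ▸ hq.1)
          · rw [if_neg hc] at hq
            have hqg : q ∉ group := by
              intro hmem
              have h1 := hbk c q hq
              have h2 := hgHead q hmem
              rw [h1] at h2
              exact hc (Option.some.inj h2)
            rw [bStep_fst_get? text j group first [] q, if_neg (fun hcj => hqg hcj.1)]
            exact hnone c q hq
        have IH := bScan_get text rest (j + 1) (buckets.insert ch (group.foldl (bStepF text j) (first, [])).2)
          (group.foldl (bStepF text j) (first, [])).1 p hrest' hbk' hnone'
        constructor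
        · intro c hc hpmem hno
          by_cases hcch : c = ch
          · subst hcch
            have hpg : p ∈ group := hgroup ▸ hpmem
            by_cases hsw : PySem.Chars.startswith (text.drop j) p
            · -- found at position j: retired from the bucket, recorded in first
              have hnotin : ∀ c', p.head? = some c' →
                  p ∉ ((buckets.insert c (group.foldl (bStepF text j) (first, [])).2).getD c' []) := by
                intro c' hc'
                have : c' = c := by rw [hc] at hc'; exact (Option.some.inj hc').symm
                subst this
                rw [PySem.Dict.getD_insert, if_pos rfl, hsnd]
                simp [hsw]
              rw [IH.2 hnotin, bStep_fst_get? text j group first [] p, if_pos ⟨hpg, hsw⟩]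
              have hpre : p <+: text.drop j := (PySem.Chars.startswith_iff _ _).1 hsw
              have hinf : PySem.Chars.isIn p text = true :=
                (PySem.Chars.exists_prefix_drop_iff_isIn _ _).1 ⟨j, hpre⟩
              have hpos : 0 ≤ PySem.Chars.find text p :=
                (PySem.Chars.find_nonneg_iff _ _).2 ((PySem.Chars.isIn_iff_infix _ _).1 hinf)
              have hspec := PySem.Chars.find_spec (s := text) (sub := p) hpos
              have hkj : (PySem.Chars.find text p).toNat = j := by
                rcases lt_trichotomy (PySem.Chars.find text p).toNat j with h | h | h
                · exact absurd hspec.1 (hno _ h)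
                · exact h
                · exact absurd hpre (hspec.2 j h)
              have heq : PySem.Chars.find text p = (j : Int) := by omega
              rw [if_neg (by omega), heq]
            · -- not found at j: stays in its bucket
              have hin : p ∈ ((buckets.insert c (group.foldl (bStepF text j) (first, [])).2).getD c []) := by
                rw [PySem.Dict.getD_insert, if_pos rfl, hsnd]
                simp only [List.nil_append, List.mem_filter, Bool.not_eq_eq_eq_not, Bool.not_true]
                exact ⟨hpg, by simp [hsw]⟩
              refine IH.1 c hc hin ?_
              intro i hi
              rcases Nat.lt_succ_iff_lt_or_eq.1 hi with h | h
              · exact hno i h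
              · subst h; exact fun hpre => hsw ((PySem.Chars.startswith_iff _ _).2 hpre)
          · -- a different first character: untouched this step
            have hpg : p ∉ group := by
              intro hmem
              have := hgHead p hmem
              rw [hc] at this
              exact hcch (Option.some.inj this)
            have hin : p ∈ ((buckets.insert ch (group.foldl (bStepF text j) (first, [])).2).getD c []) := by
              rw [PySem.Dict.getD_insert, if_neg hcch]
              exact hpmem
            have hres := IH.1 c hc hin ?_
            · rw [hres]
            · intro i hi
              rcases Nat.lt_succ_iff_lt_or_eq.1 hi with h | h
              · exact hno i h
              · subst h; exact hnopre p c hc hcch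
        · intro hfr
          have hpg : p ∉ group := by
            intro hmem
            have hh := hgHead p hmem
            exact hfr ch hh (hgroup ▸ hmem)
          have hnotin : ∀ c', p.head? = some c' →
              p ∉ ((buckets.insert ch (group.foldl (bStepF text j) (first, [])).2).getD c' []) := by
            intro c' hc'
            rw [PySem.Dict.getD_insert]
            by_cases hcc : c' = ch
            · rw [if_pos hcc, hsnd]
              simp only [List.nil_append, List.mem_filter]
              exact fun hq => hpg hq.1
            · rw [if_neg hcc]
              exact hfr c' hc'
          rw [IH.2 hnotin, bStep_fst_get? text j group first [] p, if_neg (fun hcj => hpg hcj.1)]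

theorem reconstruct_eq (tu : String) (first : PySem.Dict (List Char) Int) (key : String) :
    ∀ (vs : List String) (hits : List (Int × String)),
      (∀ p ∈ vs, first.get? (PySem.Str.upper p).toList
          = if PySem.Chars.find tu.toList (PySem.Str.upper p).toList = -1 then none
            else some (PySem.Chars.find tu.toList (PySem.Str.upper p).toList)) →
      aFindVariant tu key vs hits = bReconstruct first key vs hits
  | [], _, _ => rfl
  | p :: rest, hits, h => by
    have hp := h p (List.mem_cons_self)
    rw [aFindVariant, bReconstruct, hp]
    simp only [PySem.Str.find_eq, PySem.Str.toList_upper]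
    by_cases hm : PySem.Chars.find tu.toList (PySem.Chars.upper p.toList) = -1
    · rw [if_pos hm, if_neg (by simp [hm])]
      exact reconstruct_eq tu first key rest hits (fun q hq => h q (List.mem_cons_of_mem _ hq))
    · rw [if_neg hm, if_pos hm]

theorem foldl_hits_eq (tu : String) (first : PySem.Dict (List Char) Int) :
    ∀ (hv : List (String × List String)) (hits : List (Int × String)),
      (∀ kv ∈ hv, ∀ p ∈ kv.2, first.get? (PySem.Str.upper p).toList
          = if PySem.Chars.find tu.toList (PySem.Str.upper p).toList = -1 then none
            else some (PySem.Chars.find tu.toList (PySem.Str.upper p).toList)) →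
      hv.foldl (fun hits kv => aFindVariant tu kv.1 kv.2 hits) hits
        = hv.foldl (fun hits kv => bReconstruct first kv.1 kv.2 hits) hits
  | [], _, _ => rfl
  | kv :: rest, hits, h => by
    rw [List.foldl_cons, List.foldl_cons,
      reconstruct_eq tu first kv.1 kv.2 hits (h kv (List.mem_cons_self)),
      foldl_hits_eq tu first rest _ (fun kv' hkv' => h kv' (List.mem_cons_of_mem _ hkv'))]

theorem build_heading_index_eq : ∀ (full_text : String) (heading_variants : List (String × List String)),
    build_heading_index full_text heading_variants = build_heading_index_alt full_text heading_variants := by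
  intro full_text hv
  rw [build_heading_index, build_heading_index_alt]
  congr 1
  apply foldl_hits_eq
  intro kv hkv p hp
  set text := (PySem.Str.upper full_text).toList with htext
  set patterns := PySem.List.dedup ((hv.flatMap (fun kv => kv.2)).map (fun p => (PySem.Str.upper p).toList)) with hpat
  set P := (PySem.Str.upper p).toList with hP
  have hmem : P ∈ patterns := by
    rw [hpat, PySem.List.mem_dedup]
    exact List.mem_map.2 ⟨p, List.mem_flatMap.2 ⟨kv, hkv, hp⟩, rfl⟩
  clear_value text patterns P
  have hbuckets := bBuild_buckets patterns (PySem.Dict.empty, PySem.Dict.empty)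
  have hfirst0 := bBuild_first patterns (PySem.Dict.empty, PySem.Dict.empty)
  have hbk : ∀ c, ∀ q ∈ (bBuild patterns (PySem.Dict.empty, PySem.Dict.empty)).1.getD c [],
      q.head? = some c := by
    intro c q hq
    rw [hbuckets c] at hq
    simp only [PySem.Dict.getD_empty, List.nil_append, List.mem_filter, beq_iff_eq] at hq
    exact hq.2
  have hnone : ∀ c, ∀ q ∈ (bBuild patterns (PySem.Dict.empty, PySem.Dict.empty)).1.getD c [],
      (bBuild patterns (PySem.Dict.empty, PySem.Dict.empty)).2.get? q = none := by
    intro c q hq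
    have hqh := hbk c q hq
    rw [hfirst0 q, if_neg, PySem.Dict.get?_empty]
    rintro ⟨rfl, -⟩
    simp at hqh
  have hscan := bScan_get text text 0 (bBuild patterns (PySem.Dict.empty, PySem.Dict.empty)).1
    (bBuild patterns (PySem.Dict.empty, PySem.Dict.empty)).2 P (by simp) hbk hnone
  by_cases hPnil : P = []
  · -- the empty pattern: recorded as 0 before the sweep, never touched by it
    have hfr := hscan.2 (by rw [hPnil]; intro c hc; simp at hc)
    rw [hPnil] at hfr ⊢
    rw [hfr, hfirst0 [], if_pos ⟨rfl, hPnil ▸ hmem⟩, PySem.Chars.find_nil]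
    norm_num
  · obtain ⟨c, tl, hPc⟩ : ∃ c tl, P = c :: tl := by
      cases hq : P with
      | nil => exact absurd hq hPnil
      | cons c tl => exact ⟨c, tl, rfl⟩
    have hin : P ∈ (bBuild patterns (PySem.Dict.empty, PySem.Dict.empty)).1.getD c [] := by
      rw [hbuckets c]
      simp only [PySem.Dict.getD_empty, List.nil_append, List.mem_filter, beq_iff_eq]
      exact ⟨hmem, by rw [hPc]; rfl⟩
    have hhead : P.head? = some c := by simp [hPc]
    have hnolt : ∀ i, i < 0 → ¬ (P <+: text.drop i) := fun i hi => absurd hi (Nat.not_lt_zero i)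
    exact hscan.1 c hhead hin hnolt

-- ===== VERDICT (by name: the statement is the Claim_ definition above) =====
theorem build_heading_index_spec : Claim_equal_build_heading_index := by
  intro full_text heading_variants _
  unfold Spec_build_heading_index
  exact build_heading_index_eq full_text heading_variants
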